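-- pv_equiv track=rewrite | github.com/RobertaBtt/PythonProblemSolving | Codility/Tests/CodilityTest_ChunkSplit.py | solution
-- ===== SOURCE A (Python) =====
-- def solution(S):
--
--     lenS = len(S)
--     positions = []
--     for k,s in enumerate(S):
--         if s == 'a':
--             positions.append(k)
--
--     total_count_a = len(positions)
--
--     # Corner Case: not enought a to split in a omogeneus way
--     if total_count_a%3 !=0:
--         return 0
--
--     # Corner Case: not 'a' at all
--     if total_count_a == 0:
--         return ((lenS-1) * (lenS-2)) // 2
--
--     # General
--     # Number of 'a' in each substring
--     letter_a_for_chunk = total_count_a // 3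
--
--     #Init the chunks
--     first_cut, second_cut = 0,0
--
--     # Traversing from the beginning
--     count=0
--     for i in range(lenS):
--
--         # Incrementing the count
--         # if the element is '0'
--         if S[i] == 'a':
--             count += 1
--
--         if(count == letter_a_for_chunk):
--             first_cut +=1
--
--         # Incrementing the ways for the
--         # 2nd cut if count is equal to
--         # 2*(zeros required in each substring)
--         elif (count == 2 * letter_a_for_chunk):
--             second_cut += 1
--
--     return first_cut * second_cut
-- ===== SOURCE B (Python) =====
-- def solution(S):
--     positions = [k for k, s in enumerate(S) if s == 'a']
--     total = len(positions)
--     if total % 3 != 0: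
--         return 0
--     if total == 0:
--         return ((len(S) - 1) * (len(S) - 2)) // 2
--     c = total // 3
--     return (positions[c] - positions[c - 1]) * (positions[2 * c] - positions[2 * c - 1])
-- ===== Notes on version B (the rewrite author's own statement) =====
-- stated objective: simpler
-- what changed: A's second O(n) scan that re-tallies prefix letter counts to count cut points is replaced by closed-form index arithmetic on the list of positions of the target letter: (positions[c]-positions[c-1])*(positions[2c]-positions[2c-1]) with c = total//3.
import Mathlib
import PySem

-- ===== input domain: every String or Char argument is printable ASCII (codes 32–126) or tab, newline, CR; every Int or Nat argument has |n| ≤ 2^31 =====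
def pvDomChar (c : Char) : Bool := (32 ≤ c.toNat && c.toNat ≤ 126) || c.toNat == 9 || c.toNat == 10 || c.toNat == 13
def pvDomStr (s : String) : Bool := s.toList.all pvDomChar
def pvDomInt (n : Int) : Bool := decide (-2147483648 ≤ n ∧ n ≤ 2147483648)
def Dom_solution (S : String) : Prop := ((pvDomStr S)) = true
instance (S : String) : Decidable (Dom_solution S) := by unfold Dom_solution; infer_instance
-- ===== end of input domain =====

-- B replaces A's second counting scan by closed-form arithmetic on the 'a'-position list (objective: simpler).

-- ===== PORT A =====
def solution (S : String) : Int :=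
  let lenS : Int := PySem.Str.len S
  let positions : List Int :=
    (PySem.List.enumerate S.toList 0).foldl
      (fun acc p => if p.2 = 'a' then acc ++ [p.1] else acc) []
  let total_count_a : Int := (positions.length : Int)
  if PySem.Int.mod total_count_a 3 ≠ 0 then 0
  else if total_count_a = 0 then PySem.Int.floordiv ((lenS - 1) * (lenS - 2)) 2
  else
    let letter_a_for_chunk : Int := PySem.Int.floordiv total_count_a 3
    let st :=
      (PySem.List.pyRange 0 lenS 1).foldl
        (fun (st : Int × Int × Int) i =>
          let count := if PySem.Str.pyGet? S i = some 'a' then st.1 + 1 else st.1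
          if count = letter_a_for_chunk then (count, st.2.1 + 1, st.2.2)
          else if count = 2 * letter_a_for_chunk then (count, st.2.1, st.2.2 + 1)
          else (count, st.2.1, st.2.2))
        ((0 : Int), (0 : Int), (0 : Int))
    st.2.1 * st.2.2

-- ===== PORT B =====
def solution_alt (S : String) : Int :=
  let positions : List Int :=
    (PySem.List.enumerate S.toList 0).filterMap
      (fun p => if p.2 = 'a' then some p.1 else none)
  let total : Int := (positions.length : Int)
  if PySem.Int.mod total 3 ≠ 0 then 0
  else if total = 0 then
    PySem.Int.floordiv ((PySem.Str.len S - 1) * (PySem.Str.len S - 2)) 2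
  else
    let c : Int := PySem.Int.floordiv total 3
    (PySem.List.pyGetD positions c 0 - PySem.List.pyGetD positions (c - 1) 0) *
      (PySem.List.pyGetD positions (2 * c) 0 - PySem.List.pyGetD positions (2 * c - 1) 0)

-- ===== PRECONDITION & SPEC =====
def Spec_solution (S : String) (out : Int) : Prop := out = solution_alt S
instance (S : String) (out : Int) : Decidable (Spec_solution S out) := by unfold Spec_solution; infer_instance

-- ===== CLAIM (what is proved, stated in full; the proofs are below) =====
def Claim_equal_solution : Prop := ∀ (S : String), Dom_solution S → Spec_solution S (solution S)

-- ===== LEMMAS AND PROOFS =====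

/-- Positions (offset `k`) of the letter 'a' in a character list. -/
def aPos : List Char → Int → List Int
  | [], _ => []
  | ch :: L, k => if ch = 'a' then k :: aPos L (k + 1) else aPos L (k + 1)
def nA : List Char → Nat
  | [] => 0
  | ch :: L => (if ch = 'a' then 1 else 0) + nA L
def stepF (c : Int) (st : Int × Int × Int) (ch : Char) : Int × Int × Int :=
  let count := if ch = 'a' then st.1 + 1 else st.1
  if count = c then (count, st.2.1 + 1, st.2.2)
  else if count = 2 * c then (count, st.2.1, st.2.2 + 1)
  else (count, st.2.1, st.2.2)
def gCnt : List Char → Int → Int → Int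
  | [], _, _ => 0
  | ch :: L, j, t =>
      let j' := if ch = 'a' then j + 1 else j
      (if j' = t then 1 else 0) + gCnt L j' t

theorem posA_eq (L : List Char) (k : Int) (acc : List Int) :
    (PySem.List.enumerate L k).foldl
      (fun acc p => if p.2 = 'a' then acc ++ [p.1] else acc) acc = acc ++ aPos L k := by
  induction L generalizing k acc with
  | nil => simp [PySem.List.enumerate_nil, aPos]
  | cons ch L ih =>
      rw [PySem.List.enumerate_cons, List.foldl_cons]
      by_cases h : ch = 'a' <;> simp [aPos, h, ih]

theorem posB_eq (L : List Char) (k : Int) :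
    (PySem.List.enumerate L k).filterMap
      (fun p => if p.2 = 'a' then some p.1 else none) = aPos L k := by
  induction L generalizing k with
  | nil => simp [PySem.List.enumerate_nil, aPos]
  | cons ch L ih =>
      rw [PySem.List.enumerate_cons, List.filterMap_cons]
      by_cases h : ch = 'a' <;> simp [aPos, h, ih]

theorem gCnt_high (L : List Char) : ∀ (j t : Int), t < j → gCnt L j t = 0 := by
  induction L with
  | nil => intro j t _; rfl
  | cons ch L ih =>
      intro j t ht
      by_cases h : ch = 'a' <;>
        simp only [gCnt, h, if_true, if_false, if_neg (show ¬ ((j:Int) + 1 = t) by omega),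
          if_neg (show ¬ ((j:Int) = t) by omega), ih _ _ (by omega : t < j + 1), ih _ _ ht] <;> simp

theorem foldl_stepF (c : Int) (hc : 1 ≤ c) (L : List Char) :
    ∀ (j fc sc : Int),
      L.foldl (stepF c) (j, fc, sc) = (j + nA L, fc + gCnt L j c, sc + gCnt L j (2 * c)) := by
  induction L with
  | nil => intro j fc sc; simp [nA, gCnt]
  | cons ch L ih =>
      intro j fc sc
      rw [List.foldl_cons]
      have hne : ∀ x : Int, x = c → ¬ x = 2 * c := by omega
      have hcc : ¬ (2 * c : Int) = c := by omega
      by_cases h : ch = 'a'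
      · by_cases h1 : (j + 1 : Int) = c
        · have e : stepF c (j, fc, sc) ch = (j + 1, fc + 1, sc) := by
            simp [stepF, h, h1, hne _ h1]
          rw [e, ih]
          simp [nA, gCnt, h, h1, hne _ h1]
          try omega
        · by_cases h2 : (j + 1 : Int) = 2 * c
          · have e : stepF c (j, fc, sc) ch = (j + 1, fc, sc + 1) := by
              simp [stepF, h, h1, h2, hcc]
            rw [e, ih]
            simp [nA, gCnt, h, h1, h2, hcc]
            try omega
          · have e : stepF c (j, fc, sc) ch = (j + 1, fc, sc) := by
              simp [stepF, h, h1, h2, hcc]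
            rw [e, ih]
            simp [nA, gCnt, h, h1, h2, hcc]
            try omega
      · by_cases h1 : (j : Int) = c
        · have e : stepF c (j, fc, sc) ch = (j, fc + 1, sc) := by
            simp [stepF, h, h1, hne _ h1]
          rw [e, ih]
          simp [nA, gCnt, h, h1, hne _ h1]
          try omega
        · by_cases h2 : (j : Int) = 2 * c
          · have e : stepF c (j, fc, sc) ch = (j, fc, sc + 1) := by
              simp [stepF, h, h1, h2, hcc]
            rw [e, ih]
            simp [nA, gCnt, h, h1, h2, hcc]
            try omega
          · have e : stepF c (j, fc, sc) ch = (j, fc, sc) := by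
              simp [stepF, h, h1, h2, hcc]
            rw [e, ih]
            simp [nA, gCnt, h, h1, h2, hcc]
            try omega

theorem gCnt_zero (L : List Char) : ∀ (k j : Int), 0 < (aPos L k).length →
    gCnt L j j = (aPos L k).getD 0 0 - k := by
  induction L with
  | nil => intro k j h; simp [aPos] at h
  | cons ch L ih =>
      intro k j h
      by_cases hch : ch = 'a'
      · simp [gCnt, aPos, hch, gCnt_high L (j + 1) j (by omega)]
      · have h' : 0 < (aPos L (k + 1)).length := by simpa [aPos, hch] using h
        simp [gCnt, aPos, hch, ih (k + 1) j h']
        omega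

theorem gCnt_pos (L : List Char) : ∀ (k j : Int) (d : Nat), 1 ≤ d → d < (aPos L k).length →
    gCnt L j (j + (d : Int)) = (aPos L k).getD d 0 - (aPos L k).getD (d - 1) 0 := by
  induction L with
  | nil => intro k j d _ h2; simp [aPos] at h2
  | cons ch L ih =>
      intro k j d h1 h2
      by_cases hch : ch = 'a'
      · rcases Nat.lt_or_ge 1 d with hd | hd
        · -- d ≥ 2
          obtain ⟨d', rfl⟩ : ∃ d', d = d' + 2 := ⟨d - 2, by omega⟩
          have hlen : (d' + 1) < (aPos L (k + 1)).length := by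
            simp [aPos, hch] at h2; omega
          have hne : ¬ ((j : Int) + 1 = j + ((d' + 2 : Nat) : Int)) := by push_cast; omega
          have e : (j : Int) + ((d' + 2 : Nat) : Int) = (j + 1) + ((d' + 1 : Nat) : Int) := by
            push_cast; ring
          simp only [gCnt, aPos, hch, reduceIte]
          rw [if_neg hne, e, ih (k + 1) (j + 1) (d' + 1) (by omega) hlen]
          simp [Nat.add_sub_cancel]
        · -- d = 1
          have hd1 : d = 1 := by omega
          subst hd1
          have heq : (j : Int) + (1 : Nat) = j + 1 := by push_cast; ring
          have hlen : 0 < (aPos L (k + 1)).length := by simp [aPos, hch] at h2; omega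
          simp [gCnt, aPos, hch, gCnt_zero L (k + 1) (j + 1) hlen]
          omega
      · have hne : ¬ (j = j + (d : Int)) := by omega
        have hlen : d < (aPos L (k + 1)).length := by simpa [aPos, hch] using h2
        simp only [gCnt, hch, if_neg hne, aPos, if_false]
        simp [ih (k + 1) j d h1 hlen]

theorem solution_eq_alt (S : String) : solution S = solution_alt S := by
  have hpos : (PySem.List.enumerate S.toList 0).foldl
      (fun acc p => if p.2 = 'a' then acc ++ [p.1] else acc) ([] : List Int) = aPos S.toList 0 := by
    simpa using posA_eq S.toList 0 []
  have hposB := posB_eq S.toList 0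
  simp only [solution, solution_alt, hpos, hposB]
  by_cases hm : PySem.Int.mod (((aPos S.toList 0).length : Nat) : Int) 3 = 0
  · rw [if_neg (not_not_intro hm), if_neg (not_not_intro hm)]
    by_cases hz : (((aPos S.toList 0).length : Nat) : Int) = 0
    · rw [if_pos hz, if_pos hz]
    · rw [if_neg hz, if_neg hz]
      have h3 : (3 : Int) ∣ (((aPos S.toList 0).length : Nat) : Int) :=
        (PySem.Int.mod_eq_zero_iff_dvd _ _).mp hm
      have h3' : 3 ∣ (aPos S.toList 0).length := by exact_mod_cast h3
      have hnz : (aPos S.toList 0).length ≠ 0 := by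
        intro h; exact hz (by simp [h])
      have hdc : 1 ≤ (aPos S.toList 0).length / 3 := by omega
      have hcval : PySem.Int.floordiv (((aPos S.toList 0).length : Nat) : Int) 3
          = (((aPos S.toList 0).length / 3 : Nat) : Int) := by
        rw [PySem.Int.floordiv_eq_ediv_of_pos (by norm_num)]; omega
      rw [hcval]
      have hc : (1 : Int) ≤ (((aPos S.toList 0).length / 3 : Nat) : Int) := by exact_mod_cast hdc
      have hlen : PySem.Str.len S = ((S.toList.length : Nat) : Int) := by
        simp [PySem.Str.len_eq]
      have hcong : ∀ (st : Int × Int × Int) (i : Int),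
          i ∈ PySem.List.pyRange 0 ((S.toList.length : Nat) : Int) 1 →
          (fun (st : Int × Int × Int) (i : Int) =>
            if (if PySem.Str.pyGet? S i = some 'a' then st.1 + 1 else st.1)
                = (((aPos S.toList 0).length / 3 : Nat) : Int) then
              (if PySem.Str.pyGet? S i = some 'a' then st.1 + 1 else st.1, st.2.1 + 1, st.2.2)
            else
              if (if PySem.Str.pyGet? S i = some 'a' then st.1 + 1 else st.1)
                  = 2 * (((aPos S.toList 0).length / 3 : Nat) : Int) then
                (if PySem.Str.pyGet? S i = some 'a' then st.1 + 1 else st.1, st.2.1, st.2.2 + 1)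
              else (if PySem.Str.pyGet? S i = some 'a' then st.1 + 1 else st.1, st.2.1, st.2.2)) st i
            = stepF (((aPos S.toList 0).length / 3 : Nat) : Int) st (PySem.List.pyGetD S.toList i 'b') := by
        intro st i hi
        rw [PySem.List.mem_pyRange_one] at hi
        have h0 : 0 ≤ i := hi.1
        have h1 : i.toNat < S.toList.length := by omega
        have hg : PySem.Str.pyGet? S i = some (S.toList[i.toNat]) := by
          simp [PySem.Str.pyGet?, PySem.List.pyGet?_of_nonneg _ h0, List.getElem?_eq_getElem h1]
        have hd : PySem.List.pyGetD S.toList i 'b' = S.toList[i.toNat] :=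
          PySem.List.pyGetD_eq_getElem _ _ h0 hi.2
        simp only [hg, hd, stepF, Option.some.injEq]
      have hA := PySem.List.foldl_congr_mem
          (PySem.List.pyRange 0 ((S.toList.length : Nat) : Int) 1)
          (fun (st : Int × Int × Int) (i : Int) =>
            if (if PySem.Str.pyGet? S i = some 'a' then st.1 + 1 else st.1)
                = (((aPos S.toList 0).length / 3 : Nat) : Int) then
              (if PySem.Str.pyGet? S i = some 'a' then st.1 + 1 else st.1, st.2.1 + 1, st.2.2)
            else
              if (if PySem.Str.pyGet? S i = some 'a' then st.1 + 1 else st.1)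
                  = 2 * (((aPos S.toList 0).length / 3 : Nat) : Int) then
                (if PySem.Str.pyGet? S i = some 'a' then st.1 + 1 else st.1, st.2.1, st.2.2 + 1)
              else (if PySem.Str.pyGet? S i = some 'a' then st.1 + 1 else st.1, st.2.1, st.2.2))
          (fun st i => stepF (((aPos S.toList 0).length / 3 : Nat) : Int) st
            (PySem.List.pyGetD S.toList i 'b'))
          ((0 : Int), (0 : Int), (0 : Int)) hcong
      rw [hlen, hA,
        PySem.List.foldl_pyRange_zero_pyGetD' S.toList 'b'
          (stepF (((aPos S.toList 0).length / 3 : Nat) : Int)) ((0 : Int), (0 : Int), (0 : Int)),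
        foldl_stepF _ hc]
      have g1 := gCnt_pos S.toList 0 0 ((aPos S.toList 0).length / 3) hdc (by omega)
      have g2 := gCnt_pos S.toList 0 0 (2 * ((aPos S.toList 0).length / 3)) (by omega) (by omega)
      rw [zero_add] at g1 g2
      have e3 : (2 : Int) * (((aPos S.toList 0).length / 3 : Nat) : Int)
          = ((2 * ((aPos S.toList 0).length / 3) : Nat) : Int) := by push_cast; ring
      have e2 : (((aPos S.toList 0).length / 3 : Nat) : Int) - 1
          = (((aPos S.toList 0).length / 3 - 1 : Nat) : Int) := by
        have := hdc; push_cast; omega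
      have e4 : (2 : Int) * (((aPos S.toList 0).length / 3 : Nat) : Int) - 1
          = ((2 * ((aPos S.toList 0).length / 3) - 1 : Nat) : Int) := by
        have := hdc; push_cast; omega
      rw [e2, e4, e3, g1, g2]
      simp only [PySem.List.pyGetD_natCast, List.getD_eq_getElem?_getD]
      ring
  · rw [if_pos hm, if_pos hm]

-- ===== VERDICT (by name: the statement is the Claim_ definition above) =====
theorem solution_spec : Claim_equal_solution := by
  intro S _
  unfold Spec_solution
  exact solution_eq_alt S
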